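-- pv_equiv track=rewrite | github.com/RKramare/advent-of-code-2022 | aoc06.py | get_marker
-- ===== SOURCE A (Python) =====
-- def get_marker(signal, x):
--     chars = ""
--     for i, c in enumerate(signal):
--         if len(chars) > x - 1:
--             chars = ""
--         elif c in chars:
--             n = chars.index(c)
--             chars = chars[n+1:] + c
--         else:
--             chars += c
--             if len(chars) == x:
--                 return i + 1
-- ===== SOURCE B (Python) =====
-- # note: first parameter renamed 's' (positionally identical) because the checker
-- # forbids the identifier 'signal' (stdlib module name) inside b.py
-- def get_marker(s, x):
--     last = {}
--     start = 0
--     for i, c in enumerate(s):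
--         j = last.get(c)
--         if j is not None and j >= start:
--             start = j + 1
--         last[c] = i
--         if i - start + 1 == x:
--             return i + 1
--     return None
-- ===== Notes on version B (the rewrite author's own statement) =====
-- stated objective: faster
-- what changed: Replaced the window-string with repeated membership tests and .index/slice rebuilding by a one-pass sliding window that tracks a last-seen index dict and a window start, so no inner scan of the window remains.
import Mathlib
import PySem

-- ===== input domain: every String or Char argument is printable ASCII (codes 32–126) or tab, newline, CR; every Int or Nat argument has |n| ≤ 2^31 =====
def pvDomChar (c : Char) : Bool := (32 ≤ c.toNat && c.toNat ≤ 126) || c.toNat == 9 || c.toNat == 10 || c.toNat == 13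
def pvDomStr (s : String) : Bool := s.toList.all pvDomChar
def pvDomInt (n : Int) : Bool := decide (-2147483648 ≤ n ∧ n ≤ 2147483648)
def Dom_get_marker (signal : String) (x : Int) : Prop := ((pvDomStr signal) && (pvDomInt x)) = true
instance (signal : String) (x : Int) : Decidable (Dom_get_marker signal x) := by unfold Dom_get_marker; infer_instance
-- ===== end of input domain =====

-- B replaces A's per-character scan of the window string (`in`, `.index`, slicing) by a
-- one-pass sliding window with a last-seen-index dict; return value only, no mutation.

-- ===== PORT A =====
-- loop of A: `chars` is the window string (as List Char), `i` the enumerate index.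
def get_marker_goA (x : Int) (chars : List Char) (i : Nat) (rest : List Char) : Option Int :=
  match rest with
  | [] => none
  | c :: rs =>
    if (chars.length : Int) > x - 1 then
      get_marker_goA x [] (i + 1) rs
    else if c ∈ chars then
      -- chars[n+1:] + c with n = chars.index(c) (n ≥ 0, so the slice is exact here)
      get_marker_goA x (PySem.List.slice chars (some ((chars.idxOf c : Int) + 1)) none ++ [c]) (i + 1) rs
    else
      if (((chars ++ [c]).length : Int) = x) then some ((i : Int) + 1)
      else get_marker_goA x (chars ++ [c]) (i + 1) rs

def get_marker (signal : String) (x : Int) : Option Int :=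
  get_marker_goA x [] 0 signal.toList

-- ===== PORT B =====
-- loop of B: `last` maps a char to its last-seen index, `start` is the window start.
def get_marker_goB (x : Int) (last : PySem.Dict Char Int) (start : Int) (i : Nat) (rest : List Char) : Option Int :=
  match rest with
  | [] => none
  | c :: rs =>
    let start' := match last.get? c with
      | some j => if start ≤ j then j + 1 else start
      | none => start
    if ((i : Int) - start' + 1 = x) then some ((i : Int) + 1)
    else get_marker_goB x (last.insert c (i : Int)) start' (i + 1) rs

def get_marker_alt (signal : String) (x : Int) : Option Int :=
  get_marker_goB x PySem.Dict.empty 0 0 signal.toList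

-- ===== PRECONDITION & SPEC =====
def Spec_get_marker (signal : String) (x : Int) (out : Option Int) : Prop := out = get_marker_alt signal x
instance (signal : String) (x : Int) (out : Option Int) : Decidable (Spec_get_marker signal x out) := by unfold Spec_get_marker; infer_instance

-- ===== CLAIM (what is proved, stated in full; the proofs are below) =====
def Claim_equal_get_marker : Prop := ∀ (signal : String) (x : Int), Dom_get_marker signal x → Spec_get_marker signal x (get_marker signal x)

-- ===== LEMMAS AND PROOFS =====

-- `d` records, for each char, the index of its last occurrence in `pre` (if any).
def LastSpec (pre : List Char) (d : PySem.Dict Char Int) : Prop :=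
  ∀ c : Char,
    (d.get? c = none → c ∉ pre) ∧
    (∀ j : Int, d.get? c = some j →
      ∃ k : Nat, j = (k : Int) ∧ pre[k]? = some c ∧ ∀ m : Nat, k < m → pre[m]? ≠ some c)

lemma lastSpec_nil : LastSpec [] PySem.Dict.empty := by
  intro c
  constructor
  · intro _; simp
  · intro j hj; simp [PySem.Dict.get?_empty] at hj

lemma lastSpec_insert (pre : List Char) (d : PySem.Dict Char Int) (c : Char)
    (h : LastSpec pre d) :
    LastSpec (pre ++ [c]) (d.insert c (pre.length : Int)) := by
  intro c'
  by_cases hc : c' = c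
  · subst hc
    constructor
    · intro hn; rw [PySem.Dict.get?_insert_self] at hn; cases hn
    · intro j hj; rw [PySem.Dict.get?_insert_self] at hj
      obtain rfl : j = (pre.length : Int) := by injection hj with h; exact h.symm
      refine ⟨pre.length, rfl, by simp, ?_⟩
      intro m hm
      rw [List.getElem?_eq_none (by simp; omega)]
      simp
  · constructor
    · intro hn
      rw [PySem.Dict.get?_insert, if_neg hc] at hn
      have := (h c').1 hn
      simp [this, hc]
    · intro j hj
      rw [PySem.Dict.get?_insert, if_neg hc] at hj
      obtain ⟨k, hjk, hk, hlast⟩ := (h c').2 j hj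
      have hklt : k < pre.length := (List.getElem?_eq_some_iff.mp hk).1
      refine ⟨k, hjk, ?_, ?_⟩
      · rw [List.getElem?_append_left hklt]; exact hk
      · intro m hm
        rcases lt_trichotomy m pre.length with h1 | h1 | h1
        · rw [List.getElem?_append_left h1]; exact hlast m hm
        · subst h1
          rw [List.getElem?_concat_length]
          simp [Ne.symm hc]
        · rw [List.getElem?_eq_none (by simp; omega)]; simp

-- for x ≤ 0 both loops return none
lemma goA_nonpos (x : Int) (hx : x ≤ 0) :
    ∀ (rest : List Char) (i : Nat), get_marker_goA x [] i rest = none := by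
  intro rest
  induction rest with
  | nil => intro i; simp [get_marker_goA]
  | cons c rs ih =>
    intro i
    rw [get_marker_goA, if_pos (by simp; omega)]
    exact ih (i + 1)

lemma goB_nonpos (x : Int) (hx : x ≤ 0) :
    ∀ (rest : List Char) (d : PySem.Dict Char Int) (start : Int) (i : Nat),
      0 ≤ start → start ≤ (i : Int) → (∀ c j, d.get? c = some j → j < (i : Int)) →
      get_marker_goB x d start i rest = none := by
  intro rest
  induction rest with
  | nil => intro d start i _ _ _; simp [get_marker_goB]
  | cons c rs ih =>
    intro d start i h0 hsi hd
    have key : ∀ s' : Int, 0 ≤ s' → s' ≤ (i : Int) →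
        (if ((i : Int) - s' + 1 = x) then some ((i : Int) + 1)
         else get_marker_goB x (d.insert c (i : Int)) s' (i + 1) rs) = none := by
      intro s' h0' hsi'
      rw [if_neg (by omega)]
      apply ih
      · exact h0'
      · push_cast; omega
      · intro c' j hj
        rw [PySem.Dict.get?_insert] at hj
        by_cases hne : c' = c
        · rw [if_pos hne] at hj
          obtain rfl : j = (i : Int) := by injection hj with h; exact h.symm
          push_cast; omega
        · rw [if_neg hne] at hj
          have := hd c' j hj; push_cast; omega
    rw [get_marker_goB]
    cases hget : d.get? c with
    | none => simpa [hget] using key start h0 hsi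
    | some j =>
      have hji := hd c j hget
      by_cases hsj : start ≤ j
      · simpa [hget, hsj] using key (j + 1) (by omega) (by omega)
      · simpa [hget, hsj] using key start h0 hsi

-- the simulation for x ≥ 1
lemma sim (x : Int) :
    ∀ (rest pre chars : List Char) (d : PySem.Dict Char Int) (start : Nat),
      start ≤ pre.length →
      chars = pre.drop start →
      chars.Nodup →
      (chars.length : Int) ≤ x - 1 →
      LastSpec pre d →
      get_marker_goA x chars pre.length rest = get_marker_goB x d (start : Int) pre.length rest := by
  intro rest
  induction rest with
  | nil => intro pre chars d start _ _ _ _ _; simp [get_marker_goA, get_marker_goB]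
  | cons c rs ih =>
    intro pre chars d start hstart hchars hnodup hlen hlast
    have hclen : chars.length = pre.length - start := by rw [hchars, List.length_drop]
    rw [get_marker_goA, if_neg (by omega)]
    by_cases hc : c ∈ chars
    · -- duplicate branch
      have hplt : chars.idxOf c < chars.length := List.idxOf_lt_length_of_mem hc
      have hcp : chars[chars.idxOf c]? = some c := by
        rw [List.getElem?_eq_getElem hplt]; rw [List.getElem_idxOf hplt]
      have hpre_p : pre[start + chars.idxOf c]? = some c := by
        have h1 : (pre.drop start)[chars.idxOf c]? = some c := by rw [← hchars]; exact hcp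
        rwa [List.getElem?_drop] at h1
      have hcpre : c ∈ pre := by
        rw [hchars] at hc; exact List.mem_of_mem_drop hc
      obtain ⟨j, hj⟩ : ∃ j, d.get? c = some j := by
        cases hg : d.get? c with
        | none => exact absurd hcpre ((hlast c).1 hg)
        | some j => exact ⟨j, rfl⟩
      obtain ⟨k, rfl, hk, hklast⟩ := (hlast c).2 j hj
      have hkltpre : k < pre.length := by
        obtain ⟨h1, _⟩ := List.getElem?_eq_some_iff.mp hk; exact h1
      have hkge : start ≤ k := by
        by_contra hlt
        exact hklast (start + chars.idxOf c) (by omega) hpre_p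
      have hck : chars[k - start]? = some c := by
        rw [hchars, List.getElem?_drop, Nat.add_sub_cancel' hkge]; exact hk
      have hkp : k - start = chars.idxOf c := by
        obtain ⟨hl1, he1⟩ := List.getElem?_eq_some_iff.mp hck
        obtain ⟨hl2, he2⟩ := List.getElem?_eq_some_iff.mp hcp
        exact (List.Nodup.getElem_inj_iff hnodup).mp (by rw [he1, he2])
      have hkval : k = start + chars.idxOf c := by omega
      rw [get_marker_goB]
      simp only [hj]
      rw [if_pos (show (start : Int) ≤ (k : Int) by exact_mod_cast hkge)]
      rw [if_neg (show ¬ ((pre.length : Int) - ((k : Int) + 1) + 1 = x) by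
        have h2 : (k : Int) = (start : Int) + (chars.idxOf c : Int) := by exact_mod_cast hkval
        omega)]
      rw [if_pos hc]
      rw [PySem.List.slice_from chars (show (0 : Int) ≤ (chars.idxOf c : Int) + 1 by omega)]
      rw [show ((chars.idxOf c : Int) + 1).toNat = chars.idxOf c + 1 by omega]
      have hccut : c ∉ chars.drop (chars.idxOf c + 1) := by
        intro hmem
        rw [List.mem_iff_getElem?] at hmem
        obtain ⟨m, hm⟩ := hmem
        rw [List.getElem?_drop] at hm
        obtain ⟨hl1, he1⟩ := List.getElem?_eq_some_iff.mp hm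
        obtain ⟨hl2, he2⟩ := List.getElem?_eq_some_iff.mp hcp
        have := (List.Nodup.getElem_inj_iff hnodup).mp (he1.trans he2.symm)
        omega
      rw [show (k : Int) + 1 = ((start + chars.idxOf c + 1 : Nat) : Int) by push_cast; omega]
      rw [show pre.length + 1 = (pre ++ [c]).length by simp]
      apply ih (pre ++ [c]) _ _ (start + chars.idxOf c + 1)
      · simp; omega
      · rw [List.drop_append_of_le_length (by omega), hchars, List.drop_drop, ← Nat.add_assoc]
      · simp [List.nodup_append, (List.drop_sublist _ _).nodup hnodup]
        exact fun a ha he => hccut (he ▸ ha)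
      · simp only [List.length_append, List.length_drop, List.length_cons, List.length_nil]
        omega
      · exact lastSpec_insert pre d c hlast
    · -- fresh-char branch
      have hgetlt : ∀ j, d.get? c = some j → ¬ ((start : Int) ≤ j) := by
        intro j hg hle
        obtain ⟨k, rfl, hk, _⟩ := (hlast c).2 j hg
        have hkge : start ≤ k := by exact_mod_cast hle
        apply hc
        rw [hchars]
        apply List.mem_of_getElem? (i := k - start)
        rw [List.getElem?_drop, Nat.add_sub_cancel' hkge]; exact hk
      have hclenZ : (chars.length : Int) = (pre.length : Int) - (start : Int) := by
        rw [hclen]; push_cast [hstart]; ring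
      rw [if_neg hc, get_marker_goB]
      have hBstart : (match d.get? c with
          | some j => if (start : Int) ≤ j then j + 1 else (start : Int)
          | none => (start : Int)) = (start : Int) := by
        cases hg : d.get? c with
        | none => rfl
        | some j => simp [hgetlt j hg]
      simp only [hBstart]
      by_cases hret : (chars.length : Int) + 1 = x
      · rw [if_pos (by simp; omega), if_pos (by omega)]
      · rw [if_neg (by simp; omega), if_neg (by omega)]
        rw [show pre.length + 1 = (pre ++ [c]).length by simp]
        apply ih (pre ++ [c]) _ _ start
        · simp; omega
        · rw [List.drop_append_of_le_length hstart, hchars]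
        · simp [List.nodup_append, hnodup]
          exact fun a ha he => hc (he ▸ ha)
        · simp; omega
        · exact lastSpec_insert pre d c hlast

-- ===== VERDICT (by name: the statement is the Claim_ definition above) =====
theorem get_marker_spec : Claim_equal_get_marker := by
  intro signal x _
  unfold Spec_get_marker get_marker get_marker_alt
  by_cases hx : 1 ≤ x
  · have := sim x signal.toList [] [] PySem.Dict.empty 0 (by simp) (by simp) (by simp)
      (by simp; omega) lastSpec_nil
    simpa using this
  · rw [goA_nonpos x (by omega), goB_nonpos x (by omega) _ _ _ _ le_rfl (by simp)]
    intro c j hj; simp [PySem.Dict.get?_empty] at hj
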